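-- pv_equiv track=rewrite | github.com/yuknig/CommitPatches | CommitPatches.py | parse_patch_num
-- ===== SOURCE A (Python) =====
-- def parse_patch_num(patch_file_name):
--     patch_num = 0
--     for ch in patch_file_name:
--         digit = ord(ch) - ord('0')
--         if digit < 0 or digit > 9:
--             break
--         patch_num = digit + patch_num*10
--     return patch_num
-- ===== SOURCE B (Python) =====
-- def parse_patch_num(patch_file_name):
--     # phase 1: length of the leading ASCII-digit run
--     k = 0
--     for ch in patch_file_name:
--         if not ('0' <= ch <= '9'):
--             break
--         k += 1
--     # phase 2: positional sum over the prefix, least-significant digit first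
--     total = 0
--     power = 1
--     for ch in reversed(patch_file_name[:k]):
--         total += (ord(ch) - 48) * power
--         power *= 10
--     return total
-- ===== Notes on version B (the rewrite author's own statement) =====
-- stated objective: alternative
-- what changed: Replaces the single-pass Horner accumulation with break by two phases: first measure the leading digit run, then sum its digits right-to-left with an explicit power-of-ten accumulator.
import Mathlib
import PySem

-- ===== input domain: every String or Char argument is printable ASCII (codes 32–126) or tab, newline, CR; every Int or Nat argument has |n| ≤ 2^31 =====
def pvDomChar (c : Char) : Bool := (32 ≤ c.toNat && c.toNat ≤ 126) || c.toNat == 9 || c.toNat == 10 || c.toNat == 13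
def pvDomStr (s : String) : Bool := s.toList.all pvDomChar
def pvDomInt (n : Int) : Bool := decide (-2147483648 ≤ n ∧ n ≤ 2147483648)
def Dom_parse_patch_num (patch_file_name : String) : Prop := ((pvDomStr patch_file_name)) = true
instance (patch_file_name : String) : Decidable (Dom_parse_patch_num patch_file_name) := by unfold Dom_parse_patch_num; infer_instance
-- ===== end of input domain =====

-- B parses the leading digit run in two phases (measure the run, then a right-to-left
-- positional sum) instead of A's single Horner loop with break; alternative, not faster.

-- ===== PORT A =====
-- A's for-loop with break: structural recursion over the characters with the accumulator.
def pvGoA : List Char → Int → Int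
  | [], acc => acc
  | c :: cs, acc =>
    let digit : Int := (c.toNat : Int) - 48
    if digit < 0 ∨ digit > 9 then acc else pvGoA cs (digit + acc * 10)

def parse_patch_num (patch_file_name : String) : Int :=
  pvGoA patch_file_name.toList 0

-- ===== PORT B =====
-- phase 1 of Source B: count the leading run of chars with '0' ≤ ch ≤ '9' (break otherwise).
def pvCountB : List Char → Nat
  | [] => 0
  | c :: cs => if '0' ≤ c ∧ c ≤ '9' then pvCountB cs + 1 else 0

-- phase 2 of Source B: loop over the reversed prefix with total/power accumulators.
def pvSumB : List Char → Int → Int → Int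
  | [], total, _ => total
  | c :: cs, total, power => pvSumB cs (total + ((c.toNat : Int) - 48) * power) (power * 10)

def parse_patch_num_alt (patch_file_name : String) : Int :=
  let cs := patch_file_name.toList
  pvSumB (cs.take (pvCountB cs)).reverse 0 1

-- ===== PRECONDITION & SPEC =====
def Spec_parse_patch_num (patch_file_name : String) (out : Int) : Prop := out = parse_patch_num_alt patch_file_name
instance (patch_file_name : String) (out : Int) : Decidable (Spec_parse_patch_num patch_file_name out) := by unfold Spec_parse_patch_num; infer_instance

-- ===== CLAIM (what is proved, stated in full; the proofs are below) =====
def Claim_equal_parse_patch_num : Prop := ∀ (patch_file_name : String), Dom_parse_patch_num patch_file_name → Spec_parse_patch_num patch_file_name (parse_patch_num patch_file_name)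

-- ===== LEMMAS AND PROOFS =====
-- the digit predicate both programs test, as a single Bool
def pvIsDig (c : Char) : Bool := decide ('0' ≤ c ∧ c ≤ '9')

-- little-endian value of a digit list (first char least significant)
def pvR : List Char → Int
  | [] => 0
  | c :: cs => ((c.toNat : Int) - 48) + 10 * pvR cs

lemma pvIsDig_iff (c : Char) : pvIsDig c = true ↔ (48 ≤ c.toNat ∧ c.toNat ≤ 57) := by
  simp only [pvIsDig, decide_eq_true_eq]
  rw [Char.le_def, Char.le_def, UInt32.le_iff_toNat_le, UInt32.le_iff_toNat_le]
  rw [show ('0':Char).val.toNat = 48 from rfl, show ('9':Char).val.toNat = 57 from rfl,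
      show c.val.toNat = c.toNat from rfl]

lemma take_count_eq (cs : List Char) : cs.take (pvCountB cs) = cs.takeWhile pvIsDig := by
  induction cs with
  | nil => rfl
  | cons c cs ih =>
    simp only [pvCountB, List.takeWhile]
    by_cases h : '0' ≤ c ∧ c ≤ '9'
    · rw [if_pos h, show pvIsDig c = true from by simp [pvIsDig, h]]
      simp [ih]
    · rw [if_neg h, show pvIsDig c = false from by simp [pvIsDig, h]]
      simp

lemma pvSumB_eq (xs : List Char) (t p : Int) : pvSumB xs t p = t + p * pvR xs := by
  induction xs generalizing t p with
  | nil => simp [pvSumB, pvR]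
  | cons c cs ih => simp [pvSumB, pvR, ih]; ring

lemma pvR_append_singleton (xs : List Char) (c : Char) :
    pvR (xs ++ [c]) = pvR xs + ((c.toNat : Int) - 48) * 10 ^ xs.length := by
  induction xs with
  | nil => simp [pvR]
  | cons b bs ih => simp [pvR, ih]; ring

lemma pvGoA_eq (cs : List Char) (acc : Int) :
    pvGoA cs acc = pvR (cs.takeWhile pvIsDig).reverse + acc * 10 ^ (cs.takeWhile pvIsDig).length := by
  induction cs generalizing acc with
  | nil => simp [pvGoA, pvR]
  | cons c cs ih =>
    by_cases h : pvIsDig c = true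
    · have hn := (pvIsDig_iff c).mp h
      simp only [pvGoA, List.takeWhile, h]
      rw [if_neg (by omega)]
      simp only [List.reverse_cons, List.length_cons]
      rw [ih, pvR_append_singleton]
      simp [List.length_reverse]
      ring
    · have hn : ¬ (48 ≤ c.toNat ∧ c.toNat ≤ 57) := fun hh => h ((pvIsDig_iff c).mpr hh)
      simp only [pvGoA, List.takeWhile, eq_false_of_ne_true h]
      rw [if_pos (by omega)]
      simp [pvR]

-- ===== VERDICT (by name: the statement is the Claim_ definition above) =====
theorem parse_patch_num_spec : Claim_equal_parse_patch_num := by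
  intro s _
  show parse_patch_num s = parse_patch_num_alt s
  simp only [parse_patch_num, parse_patch_num_alt, take_count_eq, pvSumB_eq, pvGoA_eq]
  ring
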